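-- pv_equiv track=rewrite | github.com/maxclaey/AoC-2020 | aoc2020/solvers/implementations/day16.py | _valid_fields
-- ===== SOURCE A (Python) =====
-- from typing import Dict, List, Optional, Set, Tuple
--
-- TicketFields = Dict[str, List[Tuple[int, int]]]
--
-- Ticket = List[int]
--
-- def _valid_fields(
--     fields: TicketFields, ticket: Ticket
-- ) -> Tuple[Optional[int], Dict[str, Set[int]]]:
--     # For each field, keep track of the value indices that satisfy this field
--     possible_indices: Dict[str, Set[int]] = {f: set() for f in fields}
--     # Iterate over ticket fields
--     for i, val in enumerate(ticket):
--         val_ok = False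
--         for field, ranges in fields.items():
--             # Check if value matches one of the ranges for this field
--             for r in ranges:
--                 if r[0] <= val <= r[1]:
--                     possible_indices[field].add(i)
--                     val_ok = True
--                     continue
--         # Value could not be matched to any ticket, so invalid ticket
--         if not val_ok:
--             return val, {}
--     return None, possible_indices
-- ===== SOURCE B (Python) =====
-- def _valid_fields(fields, ticket):
--     # Two phases instead of A's incremental dict-building pass:
--     # first scan for an invalid value (short-circuiting), then build the
--     # index sets field-major in one comprehension.
--     def matches(ranges, val):
--         return any(lo <= val <= hi for lo, hi in ranges)
--
--     for val in ticket:
--         if not any(matches(ranges, val) for ranges in fields.values()):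
--             return val, {}
--     return None, {
--         field: {i for i, v in enumerate(ticket) if matches(ranges, v)}
--         for field, ranges in fields.items()
--     }
-- ===== Notes on version B (the rewrite author's own statement) =====
-- stated objective: alternative
-- what changed: A makes one value-major pass that mutates a dict of index sets and tracks a validity flag; B first scans the ticket for an invalid value with a short-circuiting any() and then builds the whole result dict field-major in one comprehension.
import Mathlib
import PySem

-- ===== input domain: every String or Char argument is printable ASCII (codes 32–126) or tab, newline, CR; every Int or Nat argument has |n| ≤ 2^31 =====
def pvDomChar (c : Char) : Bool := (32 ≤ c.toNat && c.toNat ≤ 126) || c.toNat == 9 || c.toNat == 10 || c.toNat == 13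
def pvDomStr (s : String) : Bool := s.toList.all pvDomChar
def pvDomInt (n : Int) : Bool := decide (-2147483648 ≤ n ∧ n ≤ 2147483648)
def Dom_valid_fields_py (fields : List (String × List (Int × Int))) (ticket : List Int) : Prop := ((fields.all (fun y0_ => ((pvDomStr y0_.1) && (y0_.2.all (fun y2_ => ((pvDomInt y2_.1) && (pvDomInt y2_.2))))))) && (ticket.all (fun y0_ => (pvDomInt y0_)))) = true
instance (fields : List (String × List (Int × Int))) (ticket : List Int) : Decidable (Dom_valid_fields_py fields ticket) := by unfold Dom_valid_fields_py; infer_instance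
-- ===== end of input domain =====

-- ===== PORT A =====
-- B reorganises A's single mutating pass into a validity scan plus a field-major dict build (alternative decomposition, same cost).
-- Both ports marshal the dict parameter from its association-list encoding via PySem.Dict.ofList, as Python dict construction would.

-- A-side helpers: the inner two loops of one ticket-value step, and the main loop with its early return
def aFieldsPass (fitems : List (String × List (Int × Int))) (i v : Int)
    (st : PySem.Dict String (List Int) × Bool) : PySem.Dict String (List Int) × Bool :=
  fitems.foldl (fun st fr =>
    fr.2.foldl (fun st r =>
      if r.1 ≤ v ∧ v ≤ r.2 then (st.1.modify fr.1 [] (fun s => PySem.Set.add s i), true) else st) st) st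

def aLoop (fitems : List (String × List (Int × Int))) :
    List (Int × Int) → PySem.Dict String (List Int) → Option Int × (List (String × List Int))
  | [], pi => (none, pi.items)
  | (i, v) :: rest, pi =>
    let st := aFieldsPass fitems i v (pi, false)
    if st.2 then aLoop fitems rest st.1 else (some v, [])

def valid_fields_py (fields : List (String × List (Int × Int))) (ticket : List Int) : Option Int × (List (String × List Int)) :=
  let fd := PySem.Dict.ofList fields
  let pi0 : PySem.Dict String (List Int) :=
    fd.items.foldl (fun d fr => d.insert fr.1 []) PySem.Dict.empty   -- {f: set() for f in fields}
  aLoop fd.items (PySem.List.enumerate ticket) pi0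

-- ===== PORT B =====
-- B-side helper: matches(ranges, val)
def bMatches (ranges : List (Int × Int)) (v : Int) : Bool :=
  ranges.any (fun r => decide (r.1 ≤ v ∧ v ≤ r.2))

-- the set comprehension {i for i, v in enumerate(ticket) if matches(ranges, v)} yields distinct
-- indices in increasing order, so filter+map is exact here
def valid_fields_py_alt (fields : List (String × List (Int × Int))) (ticket : List Int) : Option Int × (List (String × List Int)) :=
  let fd := PySem.Dict.ofList fields
  match ticket.find? (fun v => ! fd.items.any (fun fr => bMatches fr.2 v)) with
  | some v => (some v, [])
  | none => (none, fd.items.map (fun fr =>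
      (fr.1, ((PySem.List.enumerate ticket).filter (fun p => bMatches fr.2 p.2)).map (·.1))))

-- ===== PRECONDITION & SPEC =====
def Spec_valid_fields_py (fields : List (String × List (Int × Int))) (ticket : List Int) (out : Option Int × (List (String × List Int))) : Prop := out = valid_fields_py_alt fields ticket
instance (fields : List (String × List (Int × Int))) (ticket : List Int) (out : Option Int × (List (String × List Int))) : Decidable (Spec_valid_fields_py fields ticket out) := by unfold Spec_valid_fields_py; infer_instance

-- ===== CLAIM (what is proved, stated in full; the proofs are below) =====
def Claim_equal_valid_fields_py : Prop := ∀ (fields : List (String × List (Int × Int))) (ticket : List Int), Dom_valid_fields_py fields ticket → Spec_valid_fields_py fields ticket (valid_fields_py fields ticket)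

-- ===== LEMMAS AND PROOFS =====

-- index sets as B computes them: the matching indices of `ticket` for one field
def gIdx (ticket : List Int) (fr : String × List (Int × Int)) : String × List Int :=
  (fr.1, ((PySem.List.enumerate ticket).filter (fun p => bMatches fr.2 p.2)).map (·.1))

theorem gIdx_eta (t : List Int) (fr : String × List (Int × Int)) :
    gIdx t fr = (fr.1, (gIdx t fr).2) := rfl

theorem fst_gIdx (t : List Int) (fr : String × List (Int × Int)) :
    (gIdx t fr).1 = fr.1 := rfl

theorem mem_gIdx_lt (t : List Int) (fr : String × List (Int × Int)) :
    ∀ j ∈ (gIdx t fr).2, j < (t.length : Int) := by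
  intro j hj
  simp only [gIdx, List.mem_map, List.mem_filter] at hj
  obtain ⟨p, ⟨hp, -⟩, rfl⟩ := hj
  rw [PySem.List.mem_enumerate_iff] at hp
  obtain ⟨k, hk, rfl⟩ := hp
  simp; omega

theorem gIdx_append_singleton (t : List Int) (v : Int) (fr : String × List (Int × Int)) :
    gIdx (t ++ [v]) fr
      = (fr.1, (gIdx t fr).2 ++ (if bMatches fr.2 v then [(t.length : Int)] else [])) := by
  simp only [gIdx, PySem.List.enumerate_append, List.filter_append, List.map_append]
  congr 1
  simp [PySem.List.enumerate]
  split_ifs <;> simp_all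

-- a dict with nodup keys is unchanged by re-inserting a present binding
theorem insert_self_of_get? (d : PySem.Dict String (List Int)) (k : String) (s : List Int)
    (hnd : d.keys.Nodup) (h : d.get? k = some s) : d.insert k s = d := by
  apply PySem.Dict.ext
  have hc : d.contains k = true := by rw [PySem.Dict.contains_eq_isSome_get?, h]; rfl
  rw [PySem.Dict.items_insert_of_contains _ _ hc]
  have hmem : (k, s) ∈ d.items := (PySem.Dict.get?_eq_some_iff_mem_items d k s hnd).mp h
  simp only [PySem.Dict.keys] at hnd
  have hcg : ∀ p ∈ d.items, (if (p.1 == k) = true then (k, s) else p) = id p := by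
    intro p hp
    by_cases hpk : p.1 = k
    · have : p = (k, s) := List.inj_on_of_nodup_map hnd hp hmem (by simpa using hpk)
      simp [this]
    · simp [hpk]
  rw [List.map_congr_left hcg, List.map_id]

theorem keys_insert_of_contains (d : PySem.Dict String (List Int)) (k : String) (v : List Int)
    (hc : d.contains k = true) : (d.insert k v).keys = d.keys := by
  simp only [PySem.Dict.keys, PySem.Dict.items_insert_of_contains _ _ hc, List.map_map]
  apply List.map_congr_left
  intro p _
  by_cases h : p.1 = k <;> simp [h, Function.comp]

-- the innermost loop of A over one field's ranges
theorem rangesFold_noop (ranges : List (Int × Int)) (v i : Int) (k : String)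
    (d : PySem.Dict String (List Int)) (s : List Int)
    (hnd : d.keys.Nodup) (hs : d.get? k = some s) (hi : i ∈ s) :
    ranges.foldl (fun st r =>
        if r.1 ≤ v ∧ v ≤ r.2 then (st.1.modify k [] (fun s => PySem.Set.add s i), true) else st)
      (d, true) = (d, true) := by
  induction ranges with
  | nil => rfl
  | cons r rs ih =>
    simp only [List.foldl_cons]
    by_cases hr : r.1 ≤ v ∧ v ≤ r.2
    · rw [if_pos hr]
      have hgetD : d.getD k [] = s := by simp [PySem.Dict.getD, hs]
      have hadd : PySem.Set.add s i = s := by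
        simp [PySem.Set.add, PySem.Set.contains, hi]
      have hmod : d.modify k [] (fun s => PySem.Set.add s i) = d := by
        simp only [PySem.Dict.modify, hgetD, hadd]
        exact insert_self_of_get? d k s hnd hs
      rw [hmod]; exact ih
    · rw [if_neg hr]; exact ih

theorem rangesFold (ranges : List (Int × Int)) (v i : Int) (k : String)
    (d : PySem.Dict String (List Int)) (s : List Int) (ok : Bool)
    (hnd : d.keys.Nodup) (hmem : (k, s) ∈ d.items) (hi : i ∉ s) :
    ranges.foldl (fun st r =>
        if r.1 ≤ v ∧ v ≤ r.2 then (st.1.modify k [] (fun s => PySem.Set.add s i), true) else st)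
      (d, ok)
    = (if bMatches ranges v then d.insert k (s ++ [i]) else d, ok || bMatches ranges v) := by
  have hs : d.get? k = some s := (PySem.Dict.get?_eq_some_iff_mem_items d k s hnd).mpr hmem
  have hc : d.contains k = true := by rw [PySem.Dict.contains_eq_isSome_get?, hs]; rfl
  induction ranges generalizing ok with
  | nil => simp [bMatches]
  | cons r rs ih =>
    simp only [List.foldl_cons]
    by_cases hr : r.1 ≤ v ∧ v ≤ r.2
    · rw [if_pos hr]
      have hgetD : d.getD k [] = s := by simp [PySem.Dict.getD, hs]
      have hadd : PySem.Set.add s i = s ++ [i] := by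
        simp [PySem.Set.add, PySem.Set.contains, hi]
      have hmod : d.modify k [] (fun s => PySem.Set.add s i) = d.insert k (s ++ [i]) := by
        simp only [PySem.Dict.modify, hgetD, hadd]
      rw [hmod]
      have hnd' : (d.insert k (s ++ [i])).keys.Nodup := by
        rw [keys_insert_of_contains d k _ hc]; exact hnd
      rw [rangesFold_noop rs v i k _ (s ++ [i]) hnd' (PySem.Dict.get?_insert_self d k _)
        (by simp)]
      simp [bMatches, hr]
    · rw [if_neg hr, ih ok]
      have hrb : decide (r.1 ≤ v ∧ v ≤ r.2) = false := by simp [hr]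
      have : bMatches (r :: rs) v = bMatches rs v := by
        simp only [bMatches, List.any_cons, hrb, Bool.false_or]
      rw [this]

-- one ticket value processed through all fields
theorem fieldsPass_inv (v : Int) (pre : List Int) :
    ∀ (l done : List (String × List (Int × Int))) (ok : Bool),
      (((done ++ l).map (·.1)).Nodup) →
      aFieldsPass l (pre.length : Int) v
        (⟨done.map (gIdx (pre ++ [v])) ++ l.map (gIdx pre)⟩, ok)
      = (⟨(done ++ l).map (gIdx (pre ++ [v]))⟩, ok || l.any (fun fr => bMatches fr.2 v)) := by
  intro l
  induction l with
  | nil => intro done ok _; simp [aFieldsPass]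
  | cons fr l' ih =>
    intro done ok hnd
    simp only [aFieldsPass, List.foldl_cons, List.map_cons]
    -- the dict at this step
    have hkeys : (((⟨done.map (gIdx (pre ++ [v])) ++ gIdx pre fr :: l'.map (gIdx pre)⟩ :
        PySem.Dict String (List Int))).keys) = (done ++ fr :: l').map (·.1) := by
      simp only [PySem.Dict.keys, List.map_append, List.map_cons, List.map_map,
        Function.comp_def, fst_gIdx]
    have hnd' : ((⟨done.map (gIdx (pre ++ [v])) ++ gIdx pre fr :: l'.map (gIdx pre)⟩ :
        PySem.Dict String (List Int))).keys.Nodup := by rw [hkeys]; exact hnd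
    have hmem : (fr.1, (gIdx pre fr).2) ∈
        ((⟨done.map (gIdx (pre ++ [v])) ++ gIdx pre fr :: l'.map (gIdx pre)⟩ :
        PySem.Dict String (List Int))).items := by
      exact List.mem_append_right _ (List.mem_cons_self ..)
    have hi : ((pre.length : Int)) ∉ (gIdx pre fr).2 := by
      intro h
      exact absurd (mem_gIdx_lt pre fr _ h) (by omega)
    rw [rangesFold fr.2 v (pre.length : Int) fr.1 _ (gIdx pre fr).2 ok hnd' hmem hi]
    -- fr.1 is not a key of the other entries
    have hnotin : fr.1 ∉ done.map (·.1) ∧ fr.1 ∉ l'.map (·.1) := by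
      rw [List.map_append, List.map_cons] at hnd
      have h2 := List.nodup_middle.mp hnd
      rcases List.nodup_cons.mp h2 with ⟨hni, -⟩
      constructor <;> intro h <;> exact hni (by simp [h])
    have hins : ((⟨done.map (gIdx (pre ++ [v])) ++ gIdx pre fr :: l'.map (gIdx pre)⟩ :
        PySem.Dict String (List Int))).insert fr.1 ((gIdx pre fr).2 ++ [(pre.length : Int)])
        = (⟨done.map (gIdx (pre ++ [v])) ++ (fr.1, (gIdx pre fr).2 ++ [(pre.length : Int)]) ::
            l'.map (gIdx pre)⟩ : PySem.Dict String (List Int)) := by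
      have hc : ((⟨done.map (gIdx (pre ++ [v])) ++ gIdx pre fr :: l'.map (gIdx pre)⟩ :
          PySem.Dict String (List Int))).contains fr.1 = true := by
        simp only [PySem.Dict.contains]
        refine List.any_eq_true.mpr ⟨(fr.1, (gIdx pre fr).2), hmem, by simp⟩
      apply PySem.Dict.ext
      rw [PySem.Dict.items_insert_of_contains _ _ hc]
      show (done.map (gIdx (pre ++ [v])) ++ gIdx pre fr :: l'.map (gIdx pre)).map _ = _
      rw [List.map_append, List.map_cons]
      congr 1
      · rw [List.map_map]
        apply List.map_congr_left
        intro a ha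
        have : (gIdx (pre ++ [v]) a).1 ≠ fr.1 := by
          simp only [gIdx]
          intro h; exact hnotin.1 (by simpa [h] using List.mem_map_of_mem ha (f := (·.1)))
        simp [Function.comp, this]
      · congr 1
        · simp [gIdx]
        · rw [List.map_map]
          apply List.map_congr_left
          intro a ha
          have : (gIdx pre a).1 ≠ fr.1 := by
            simp only [gIdx]
            intro h; exact hnotin.2 (by simpa [h] using List.mem_map_of_mem ha (f := (·.1)))
          simp [Function.comp, this]
    by_cases hm : bMatches fr.2 v = true
    · rw [if_pos hm, hins]
      have hmid : (fr.1, (gIdx pre fr).2 ++ [(pre.length : Int)]) = gIdx (pre ++ [v]) fr := by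
        rw [gIdx_append_singleton, hm]; simp
      rw [hmid, hm]
      have hgoal := ih (done ++ [fr]) (ok || true) (by simpa using hnd)
      simp only [aFieldsPass, List.map_append, List.map_cons, List.map_nil, List.append_assoc,
        List.singleton_append] at hgoal ⊢
      rw [hgoal]
      simp [List.any_cons, hm]
    · rw [if_neg (by simpa using hm)]
      have hm' : bMatches fr.2 v = false := by simpa using hm
      have hmid : gIdx pre fr = gIdx (pre ++ [v]) fr := by
        rw [gIdx_append_singleton, hm']
        simpa using gIdx_eta pre fr
      rw [hmid]
      have hgoal := ih (done ++ [fr]) (ok || bMatches fr.2 v) (by simpa using hnd)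
      simp only [aFieldsPass, List.map_append, List.map_cons, List.map_nil, List.append_assoc,
        List.singleton_append] at hgoal ⊢
      rw [hgoal]
      simp [List.any_cons, Bool.or_assoc]

-- A's main loop computes B's find?-plus-comprehension answer
theorem aLoop_inv (fitems : List (String × List (Int × Int)))
    (hnd : (fitems.map (·.1)).Nodup) :
    ∀ (rest pre : List Int),
      aLoop fitems (PySem.List.enumerate rest (pre.length : Int)) ⟨fitems.map (gIdx pre)⟩
      = match rest.find? (fun v => ! fitems.any (fun fr => bMatches fr.2 v)) with
        | some v => (some v, [])
        | none => (none, fitems.map (gIdx (pre ++ rest))) := by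
  intro rest
  induction rest with
  | nil => intro pre; simp [aLoop, PySem.List.enumerate_nil]
  | cons v rest' ih =>
    intro pre
    rw [PySem.List.enumerate_cons]
    simp only [aLoop]
    have hst := fieldsPass_inv v pre fitems [] false (by simpa using hnd)
    simp only [List.map_nil, List.nil_append] at hst
    rw [hst]
    by_cases hP : fitems.any (fun fr => bMatches fr.2 v) = true
    · simp only [hP, Bool.false_or, if_true]
      have hlen : ((pre.length : Int) + 1) = (((pre ++ [v]).length : Int)) := by
        simp
      rw [hlen, ih (pre ++ [v])]
      have hfind : (v :: rest').find? (fun v => ! fitems.any (fun fr => bMatches fr.2 v))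
          = rest'.find? (fun v => ! fitems.any (fun fr => bMatches fr.2 v)) := by
        rw [List.find?_cons_of_neg]
        simp [hP]
      rw [hfind]
      have hpp : pre ++ [v] ++ rest' = pre ++ v :: rest' := by simp
      rw [hpp]
    · have hP' : fitems.any (fun fr => bMatches fr.2 v) = false := by simpa using hP
      rw [List.find?_cons_of_pos (by simp [hP'])]
      simp [hP']

-- ===== VERDICT (by name: the statement is the Claim_ definition above) =====
theorem valid_fields_py_spec : Claim_equal_valid_fields_py := by
  intro fields ticket _
  show _ = _
  unfold valid_fields_py valid_fields_py_alt
  have hnd : (((PySem.Dict.ofList fields : PySem.Dict String (List (Int × Int))).items.map (·.1)).Nodup) := by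
    have := PySem.Dict.nodup_keys_ofList (κ := String) (ν := List (Int × Int)) fields
    simpa [PySem.Dict.keys] using this
  have h0 : ((PySem.Dict.ofList fields : PySem.Dict String (List (Int × Int))).items.foldl
      (fun d fr => d.insert fr.1 []) PySem.Dict.empty)
      = (⟨(PySem.Dict.ofList fields : PySem.Dict String (List (Int × Int))).items.map (gIdx [])⟩ :
          PySem.Dict String (List Int)) := by
    apply PySem.Dict.ext
    have h1 := PySem.Dict.items_foldl_insert_fresh
      ((PySem.Dict.ofList fields : PySem.Dict String (List (Int × Int))).items)
      (fun fr => fr.1) (fun _ => ([] : List Int)) PySem.Dict.empty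
      (fun a _ => by simp [PySem.Dict.contains, PySem.Dict.empty]) hnd
    simp only [] at h1
    rw [h1]
    simp [PySem.Dict.empty, gIdx, PySem.List.enumerate_nil]
  simp only [h0]
  have := aLoop_inv (PySem.Dict.ofList fields).items hnd ticket []
  simp only [List.length_nil, Int.natCast_zero, List.nil_append] at this
  rw [this]
  cases ticket.find? (fun v => ! (PySem.Dict.ofList fields).items.any (fun fr => bMatches fr.2 v)) <;>
    simp [gIdx]
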